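-- pv_equiv track=rewrite | github.com/manwar/perlweeklychallenge-club | challenge-332/pokgopun/python/ch-2.py | ol
-- ===== SOURCE A (Python) =====
-- def ol(string: str) -> bool:
--     cc: dict[str,int] = {}
--     for c in string:
--         cc[c] = cc.get(c,0) + 1
--     for v in cc.values():
--         if v % 2 == 0:
--             return False
--     return True
-- ===== SOURCE B (Python) =====
-- def ol(string: str) -> bool:
--     s = sorted(string)
--     i, n = 0, len(s)
--     while i < n:
--         j = i
--         while j < n and s[j] == s[i]:
--             j += 1
--         if (j - i) % 2 == 0:
--             return False
--         i = j
--     return True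
-- ===== Notes on version B (the rewrite author's own statement) =====
-- stated objective: alternative
-- what changed: Replaces the frequency-dict build plus a scan over its values by a sort-then-run-scan: sort the characters and walk consecutive equal runs, returning False as soon as a run has even length.
import Mathlib
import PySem

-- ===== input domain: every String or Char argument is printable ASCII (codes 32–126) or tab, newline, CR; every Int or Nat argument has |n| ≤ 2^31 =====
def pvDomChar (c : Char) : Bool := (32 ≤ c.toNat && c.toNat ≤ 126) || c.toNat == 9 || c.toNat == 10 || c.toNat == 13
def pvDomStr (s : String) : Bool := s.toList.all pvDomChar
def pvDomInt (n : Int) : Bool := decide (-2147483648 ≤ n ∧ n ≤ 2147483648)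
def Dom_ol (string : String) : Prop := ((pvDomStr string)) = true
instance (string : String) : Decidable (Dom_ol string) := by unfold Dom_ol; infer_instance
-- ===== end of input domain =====

-- B replaces A's frequency dict + value scan by sorting the characters and scanning
-- consecutive equal runs (alternative decomposition, return value only).

-- ===== PORT A =====
-- the 'for v in cc.values(): if v % 2 == 0: return False' loop
def olCheckVals : List Int → Bool
  | [] => true
  | v :: r => if PySem.Int.mod v 2 == 0 then false else olCheckVals r

def ol (string : String) : Bool :=
  let cc := string.toList.foldl (fun d c => d.insert c (d.getD c 0 + 1)) PySem.Dict.empty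
  olCheckVals cc.values

-- ===== PORT B =====
-- the outer while-loop of Source B: each step consumes one run s[i..j) of equal characters
def olRuns : List Char → Bool
  | [] => true
  | c :: rest =>
      if ((rest.takeWhile (· == c)).length + 1) % 2 == 0 then false
      else olRuns (rest.dropWhile (· == c))
  termination_by l => l.length
  decreasing_by
    simpa using Nat.lt_succ_of_le (List.length_dropWhile_le _ _)

def ol_alt (string : String) : Bool :=
  olRuns (PySem.List.sorted string.toList (fun c => c) false)

-- ===== PRECONDITION & SPEC =====
def Spec_ol (string : String) (out : Bool) : Prop := out = ol_alt string
instance (string : String) (out : Bool) : Decidable (Spec_ol string out) := by unfold Spec_ol; infer_instance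

-- ===== CLAIM (what is proved, stated in full; the proofs are below) =====
def Claim_equal_ol : Prop := ∀ (string : String), Dom_ol string → Spec_ol string (ol string)

-- ===== LEMMAS AND PROOFS =====

theorem olCheckVals_eq_all (vs : List Int) :
    olCheckVals vs = vs.all (fun v => !(PySem.Int.mod v 2 == 0)) := by
  induction vs with
  | nil => rfl
  | cons v r ih =>
    simp only [olCheckVals, List.all_cons, ih]
    cases h : (PySem.Int.mod v 2 == 0) <;> simp

theorem ol_iff (string : String) :
    ol string = true ↔ ∀ c ∈ string.toList, string.toList.count c % 2 = 1 := by
  unfold ol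
  rw [PySem.Dict.foldl_insert_getD_add_one_eq_counter, olCheckVals_eq_all]
  simp only [PySem.Dict.values, PySem.Dict.items_counter, List.map_map, List.all_map,
    List.all_eq_true, PySem.Set.mem_ofList, Function.comp]
  constructor
  · intro h c hc
    have := h c hc
    simp at this
    omega
  · intro h c hc
    have := h c hc
    simp
    omega

-- every element of the dropped tail is strictly greater than the head of the run
theorem olRuns_drop_gt (c : Char) (rest : List Char) (hp : (c :: rest).Pairwise (· ≤ ·)) :
    ∀ x ∈ rest.dropWhile (· == c), c < x := by
  have hle : ∀ x ∈ rest, c ≤ x := (List.pairwise_cons.mp hp).1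
  have hpr : rest.Pairwise (· ≤ ·) := (List.pairwise_cons.mp hp).2
  cases hd : rest.dropWhile (· == c) with
  | nil => intro x hx; simp at hx
  | cons h t =>
    have hhead : ¬ ((h == c) = true) := by
      have := List.head_dropWhile_not (p := (· == c)) (l := rest) (by simp [hd])
      simpa [hd] using this
    have hhc : c < h := by
      have hmem : h ∈ rest := (List.dropWhile_sublist (· == c)).subset (by simp [hd])
      have := hle h hmem
      rcases lt_or_eq_of_le this with hlt | heq
      · exact hlt
      · exact absurd (by simp [heq.symm]) hhead
    intro x hx
    rcases List.mem_cons.mp hx with rfl | hxt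
    · exact hhc
    · have hpd : (h :: t).Pairwise (· ≤ ·) := hd ▸ (List.Pairwise.sublist (List.dropWhile_sublist (· == c)) hpr)
      exact lt_of_lt_of_le hhc ((List.pairwise_cons.mp hpd).1 x hxt)

theorem olRuns_count_head (c : Char) (rest : List Char) (hp : (c :: rest).Pairwise (· ≤ ·)) :
    (c :: rest).count c = (rest.takeWhile (· == c)).length + 1 := by
  have hd0 : (rest.dropWhile (· == c)).count c = 0 :=
    List.count_eq_zero.mpr (fun hmem => lt_irrefl c (olRuns_drop_gt c rest hp c hmem))
  have ht : (rest.takeWhile (· == c)).count c = (rest.takeWhile (· == c)).length :=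
    List.count_eq_length.mpr (fun b hb => by
      have := List.mem_takeWhile_imp hb; simp at this; simp [this])
  calc (c :: rest).count c = rest.count c + 1 := by simp
    _ = (rest.takeWhile (· == c) ++ rest.dropWhile (· == c)).count c + 1 := by
          rw [List.takeWhile_append_dropWhile]
    _ = (rest.takeWhile (· == c)).length + 1 := by
          rw [List.count_append, hd0, ht]

theorem olRuns_count_tail (c : Char) (rest : List Char) (hp : (c :: rest).Pairwise (· ≤ ·))
    (x : Char) (hx : x ∈ rest.dropWhile (· == c)) :
    (c :: rest).count x = (rest.dropWhile (· == c)).count x := by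
  have hxc : c < x := olRuns_drop_gt c rest hp x hx
  have hxt : (rest.takeWhile (· == c)).count x = 0 :=
    List.count_eq_zero.mpr (fun hmem => by
      have := List.mem_takeWhile_imp hmem
      simp at this
      exact absurd this hxc.ne')
  have hsplit : rest.count x
      = (rest.takeWhile (· == c)).count x + (rest.dropWhile (· == c)).count x := by
    conv_lhs => rw [← List.takeWhile_append_dropWhile (p := (· == c)) (l := rest)]
    rw [List.count_append]
  rw [List.count_cons]
  simp [hxc.ne, hsplit, hxt]

theorem olRuns_iff : ∀ s : List Char, s.Pairwise (· ≤ ·) →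
    (olRuns s = true ↔ ∀ c ∈ s, s.count c % 2 = 1) := by
  intro s
  induction s using olRuns.induct with
  | case1 => intro _; simp [olRuns]
  | case2 c rest heven =>
    intro hp
    constructor
    · intro h; rw [olRuns] at h; simp [heven] at h
    · intro h
      exfalso
      have hc := h c (by simp)
      rw [olRuns_count_head c rest hp] at hc
      simp at heven
      omega
  | case3 c rest heven ih =>
    intro hp
    have hpr : rest.Pairwise (· ≤ ·) := (List.pairwise_cons.mp hp).2
    have hpd : (rest.dropWhile (· == c)).Pairwise (· ≤ ·) :=
      List.Pairwise.sublist (List.dropWhile_sublist (· == c)) hpr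
    have hsub : ∀ x ∈ rest.dropWhile (· == c), x ∈ c :: rest := by
      intro x hx
      exact List.mem_cons_of_mem c ((List.dropWhile_sublist (· == c)).subset hx)
    rw [olRuns, if_neg (by simpa using heven), ih hpd]
    constructor
    · intro h x hx
      by_cases hxc : x = c
      · rw [hxc, olRuns_count_head c rest hp]
        simp at heven
        omega
      · have hxr : x ∈ rest := by
          rcases List.mem_cons.mp hx with h' | h'
          · exact absurd h' hxc
          · exact h'
        have hxd : x ∈ rest.dropWhile (· == c) := by
          have : x ∈ rest.takeWhile (· == c) ++ rest.dropWhile (· == c) := by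
            rw [List.takeWhile_append_dropWhile]; exact hxr
          rcases List.mem_append.mp this with hxt | hxd
          · exact absurd (by simpa using List.mem_takeWhile_imp hxt) hxc
          · exact hxd
        rw [olRuns_count_tail c rest hp x hxd]
        exact h x hxd
    · intro h x hx
      rw [← olRuns_count_tail c rest hp x hx]
      exact h x (hsub x hx)

theorem ol_eq_ol_alt (string : String) : ol string = ol_alt string := by
  have hperm : (PySem.List.sorted string.toList (fun c => c) false).Perm string.toList :=
    PySem.List.sorted_perm _ _ _
  have hp : (PySem.List.sorted string.toList (fun c => c) false).Pairwise (· ≤ ·) :=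
    PySem.List.sorted_pairwise _ _
  rw [Bool.eq_iff_iff, ol_iff]
  unfold ol_alt
  rw [olRuns_iff _ hp]
  constructor
  · intro h c hc
    rw [hperm.count_eq]
    exact h c (hperm.mem_iff.mp hc)
  · intro h c hc
    rw [← hperm.count_eq]
    exact h c (hperm.mem_iff.mpr hc)

-- ===== VERDICT (by name: the statement is the Claim_ definition above) =====
theorem ol_spec : Claim_equal_ol := by
  intro string _
  exact ol_eq_ol_alt string
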